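-- pv_equiv track=rewrite | github.com/maqboolahmed24/taxat_ | tools/analysis/build_state_machine_registry.py | extract_policy_line
-- ===== SOURCE A (Python) =====
-- from typing import Any, Iterable
--
-- def extract_policy_line(rule_items: list[dict[str, Any]], keywords: tuple[str, ...], fallback: str) -> str:
--     for item in rule_items:
--         lowered = item["text"].lower()
--         if all(keyword in lowered for keyword in keywords):
--             return item["text"]
--     for item in rule_items:
--         lowered = item["text"].lower()
--         if any(keyword in lowered for keyword in keywords):
--             return item["text"]
--     return fallback
-- ===== SOURCE B (Python) =====
-- def extract_policy_line(rule_items, keywords, fallback):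
--     best_any = None
--     for item in rule_items:
--         text = item["text"]
--         lowered = text.lower()
--         if all(keyword in lowered for keyword in keywords):
--             return text
--         if best_any is None and any(keyword in lowered for keyword in keywords):
--             best_any = text
--     return best_any if best_any is not None else fallback
-- ===== Notes on version B (the rewrite author's own statement) =====
-- stated objective: alternative
-- what changed: B replaces A's two sequential scans with a single pass that returns on the first all-keywords match and remembers the first any-keyword match in a variable as the fallback, so each item's text is lowered and searched at most once.
import Mathlib
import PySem

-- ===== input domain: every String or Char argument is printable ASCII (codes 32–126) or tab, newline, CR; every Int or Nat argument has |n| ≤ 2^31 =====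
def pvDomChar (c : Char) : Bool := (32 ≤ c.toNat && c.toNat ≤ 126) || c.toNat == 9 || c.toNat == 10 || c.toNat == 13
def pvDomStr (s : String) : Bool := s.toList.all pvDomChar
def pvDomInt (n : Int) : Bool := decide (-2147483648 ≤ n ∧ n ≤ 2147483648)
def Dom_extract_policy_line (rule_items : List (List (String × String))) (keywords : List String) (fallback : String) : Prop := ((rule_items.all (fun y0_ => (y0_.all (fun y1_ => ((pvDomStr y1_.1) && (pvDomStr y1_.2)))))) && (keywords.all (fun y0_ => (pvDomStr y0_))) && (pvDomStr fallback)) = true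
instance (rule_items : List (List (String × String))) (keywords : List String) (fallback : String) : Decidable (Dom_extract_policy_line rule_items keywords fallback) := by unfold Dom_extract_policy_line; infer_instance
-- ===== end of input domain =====

-- ===== PORT A =====
-- B changes: one pass instead of A's two passes over rule_items (each text lowered/searched once).
-- item["text"] is ported as first-match association-list lookup; a missing key (Python KeyError)
-- returns "" here and is excluded by Pre_extract_policy_line.
def pvText (item : List (String × String)) : String :=
  ((PySem.Dict.mk item).get? "text").getD ""

-- first pass of A: first item whose lowered text contains ALL keywords
def eplFirstAll : List (List (String × String)) → List String → Option String
  | [], _ => none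
  | item :: rest, keywords =>
    let lowered := PySem.Str.lower (pvText item)
    if keywords.all (fun k => PySem.Str.isIn k lowered) then some (pvText item)
    else eplFirstAll rest keywords

-- second pass of A: first item whose lowered text contains ANY keyword
def eplFirstAny : List (List (String × String)) → List String → Option String
  | [], _ => none
  | item :: rest, keywords =>
    let lowered := PySem.Str.lower (pvText item)
    if keywords.any (fun k => PySem.Str.isIn k lowered) then some (pvText item)
    else eplFirstAny rest keywords

def extract_policy_line (rule_items : List (List (String × String))) (keywords : List String) (fallback : String) : String :=
  match eplFirstAll rule_items keywords with
  | some t => t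
  | none =>
    match eplFirstAny rule_items keywords with
    | some t => t
    | none => fallback

-- ===== PORT B =====
-- single pass with the first any-match remembered in best_any
def eplGo : List (List (String × String)) → List String → Option String → String → String
  | [], _, bestAny, fallback => bestAny.getD fallback
  | item :: rest, keywords, bestAny, fallback =>
    let text := pvText item
    let lowered := PySem.Str.lower text
    if keywords.all (fun k => PySem.Str.isIn k lowered) then text
    else
      let bestAny' :=
        if bestAny.isNone && keywords.any (fun k => PySem.Str.isIn k lowered) then some text
        else bestAny
      eplGo rest keywords bestAny' fallback

def extract_policy_line_alt (rule_items : List (List (String × String))) (keywords : List String) (fallback : String) : String :=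
  eplGo rule_items keywords none fallback

-- ===== PRECONDITION & SPEC =====
-- Pre_ excludes exactly the inputs on which Python (A and B alike) raises KeyError: some item
-- lacking a "text" key is actually reached, i.e. no earlier item matches all keywords.
def Pre_extract_policy_line (rule_items : List (List (String × String))) (keywords : List String) (fallback : String) : Prop :=
  ∀ i : Fin rule_items.length, "text" ∉ (rule_items.get i).map Prod.fst →
    ∃ j : Fin rule_items.length, j.val < i.val ∧
      (keywords.all fun k =>
        PySem.Str.isIn k (PySem.Str.lower (((PySem.Dict.mk (rule_items.get j)).get? "text").getD ""))) = true
instance (rule_items : List (List (String × String))) (keywords : List String) (fallback : String) : Decidable (Pre_extract_policy_line rule_items keywords fallback) := by unfold Pre_extract_policy_line; infer_instance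

def pvWitness_extract_policy_line : (List (List (String × String))) × List String × String :=
  ([[("text", "Tax Rate A")], [("text", "other line")]], ["rate"], "none")
def Spec_extract_policy_line (rule_items : List (List (String × String))) (keywords : List String) (fallback : String) (out : String) : Prop := out = extract_policy_line_alt rule_items keywords fallback
instance (rule_items : List (List (String × String))) (keywords : List String) (fallback : String) (out : String) : Decidable (Spec_extract_policy_line rule_items keywords fallback out) := by unfold Spec_extract_policy_line; infer_instance

-- ===== CLAIM (what is proved, stated in full; the proofs are below) =====
def Claim_equal_extract_policy_line : Prop := ∀ (rule_items : List (List (String × String))) (keywords : List String) (fallback : String), Dom_extract_policy_line rule_items keywords fallback → Pre_extract_policy_line rule_items keywords fallback → Spec_extract_policy_line rule_items keywords fallback (extract_policy_line rule_items keywords fallback)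

-- ===== LEMMAS AND PROOFS =====

-- the single pass computes: first all-match, else the recorded any-match, else first any-match, else fallback
lemma eplGo_eq (l : List (List (String × String))) (keywords : List String)
    (bestAny : Option String) (fallback : String) :
    eplGo l keywords bestAny fallback =
      match eplFirstAll l keywords with
      | some t => t
      | none =>
        match bestAny with
        | some b => b
        | none =>
          match eplFirstAny l keywords with
          | some t => t
          | none => fallback := by
  induction l generalizing bestAny with
  | nil => cases bestAny <;> simp [eplGo, eplFirstAll, eplFirstAny]
  | cons item rest ih =>
    simp only [eplGo, eplFirstAll, eplFirstAny]
    cases hall : (keywords.all fun k => PySem.Str.isIn k (PySem.Str.lower (pvText item))) with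
    | true => simp
    | false =>
      cases bestAny with
      | some b => rw [ih]; simp
      | none =>
        cases hany : (keywords.any fun k => PySem.Str.isIn k (PySem.Str.lower (pvText item))) with
        | true => rw [ih]; simp
        | false => rw [ih]; simp

-- ===== VERDICT (by name: the statement is the Claim_ definition above) =====
theorem extract_policy_line_spec : Claim_equal_extract_policy_line := by
  intro rule_items keywords fallback _ _
  unfold Spec_extract_policy_line extract_policy_line extract_policy_line_alt
  rw [eplGo_eq]
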